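-- pv_equiv track=rewrite | github.com/pg56714/onlinejudgePractice | code/P06.py | count_special_substrings
-- ===== SOURCE A (Python) =====
-- def count_special_substrings(s):
--     unique_substrings = set()
--
--     for start in range(len(s)):
--         for end in range(start + 4, len(s) + 1):
--             substring = s[start:end]
--             if substring[0] == substring[-1] and substring[0].isupper():
--                 unique_substrings.add(substring)
--
--     return len(unique_substrings)
-- ===== SOURCE B (Python) =====
-- def count_special_substrings(s):
--     ups = [i for i, ch in enumerate(s) if ch.isupper()]
--     seen = set()
--     for k, i in enumerate(ups):
--         for j in ups[k:]:
--             if j - i >= 3 and s[i] == s[j]: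
--                 seen.add(s[i:j + 1])
--     return len(seen)
-- ===== Notes on version B (the rewrite author's own statement) =====
-- stated objective: faster
-- what changed: B builds the list of uppercase positions in one pass and enumerates only pairs of uppercase positions >=3 apart with equal characters, instead of A's scan over all O(n^2) (start,end) windows slicing and testing each window.
import Mathlib
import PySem

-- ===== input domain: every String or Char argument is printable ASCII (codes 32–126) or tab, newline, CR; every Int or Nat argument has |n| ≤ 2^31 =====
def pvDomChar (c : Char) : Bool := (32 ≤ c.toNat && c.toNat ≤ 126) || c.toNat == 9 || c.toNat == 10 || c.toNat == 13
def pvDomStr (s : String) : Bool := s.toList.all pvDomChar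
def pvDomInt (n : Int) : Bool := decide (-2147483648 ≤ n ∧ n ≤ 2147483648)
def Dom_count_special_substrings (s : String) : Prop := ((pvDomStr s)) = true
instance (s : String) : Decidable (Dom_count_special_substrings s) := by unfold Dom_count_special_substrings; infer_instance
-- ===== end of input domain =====

-- B replaces A's scan over all O(n^2) windows by pairing only uppercase positions (objective: faster).

-- ===== PORT A =====
def count_special_substrings (s : String) : Int :=
  let cs := s.toList
  let n : Int := cs.length
  let uniq : PySem.Set (List Char) :=
    (PySem.List.pyRange 0 n 1).foldl (fun st start =>
      (PySem.List.pyRange (start + 4) (n + 1) 1).foldl (fun st2 e =>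
        let sub := PySem.List.slice cs (some start) (some e)
        match PySem.List.pyGet? sub 0, PySem.List.pyGet? sub (-1) with
        | some c0, some cl =>
            if c0 == cl && PySem.Str.isupper c0 then PySem.Set.add st2 sub else st2
        | _, _ => st2) st) PySem.Set.empty
  PySem.Set.len uniq

-- ===== PORT B =====
def count_special_substrings_alt (s : String) : Int :=
  let cs := s.toList
  let ups : List Int := ((PySem.List.enumerate cs 0).filter (fun p => PySem.Str.isupper p.2)).map (·.1)
  let seen : PySem.Set (List Char) :=
    (PySem.List.enumerate ups 0).foldl (fun st ki =>
      (PySem.List.slice ups (some ki.1) none).foldl (fun st2 j =>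
        if j - ki.2 ≥ 3 then
          match PySem.List.pyGet? cs ki.2 with
          | some a =>
              match PySem.List.pyGet? cs j with
              | some b =>
                  if a == b then PySem.Set.add st2 (PySem.List.slice cs (some ki.2) (some (j + 1))) else st2
              | none => st2
          | none => st2
        else st2) st) PySem.Set.empty
  PySem.Set.len seen

-- ===== PRECONDITION & SPEC =====
def Spec_count_special_substrings (s : String) (out : Int) : Prop := out = count_special_substrings_alt s
instance (s : String) (out : Int) : Decidable (Spec_count_special_substrings s out) := by unfold Spec_count_special_substrings; infer_instance

-- ===== CLAIM (what is proved, stated in full; the proofs are below) =====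
def Claim_equal_count_special_substrings : Prop := ∀ (s : String), Dom_count_special_substrings s → Spec_count_special_substrings s (count_special_substrings s)

-- ===== LEMMAS AND PROOFS =====

-- substrings both programs collect: s[a:b+1] with b ≥ a+3, s[a] = s[b] an uppercase char
def pvQ (cs : List Char) (x : List Char) : Prop :=
  ∃ a b : Nat, a + 3 ≤ b ∧ b < cs.length ∧
    (∃ c : Char, cs[a]? = some c ∧ cs[b]? = some c ∧ PySem.Str.isupper c = true) ∧
    x = (cs.drop a).take (b + 1 - a)

def pvSetA (cs : List Char) : PySem.Set (List Char) :=
  let n : Int := cs.length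
  (PySem.List.pyRange 0 n 1).foldl (fun st start =>
    (PySem.List.pyRange (start + 4) (n + 1) 1).foldl (fun st2 e =>
      let sub := PySem.List.slice cs (some start) (some e)
      match PySem.List.pyGet? sub 0, PySem.List.pyGet? sub (-1) with
      | some c0, some cl =>
          if c0 == cl && PySem.Str.isupper c0 then PySem.Set.add st2 sub else st2
      | _, _ => st2) st) PySem.Set.empty

def pvUps (cs : List Char) : List Int :=
  ((PySem.List.enumerate cs 0).filter (fun p => PySem.Str.isupper p.2)).map (·.1)

def pvSetB (cs : List Char) : PySem.Set (List Char) :=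
  (PySem.List.enumerate (pvUps cs) 0).foldl (fun st ki =>
    (PySem.List.slice (pvUps cs) (some ki.1) none).foldl (fun st2 j =>
      if j - ki.2 ≥ 3 then
        match PySem.List.pyGet? cs ki.2 with
        | some a =>
            match PySem.List.pyGet? cs j with
            | some b =>
                if a == b then PySem.Set.add st2 (PySem.List.slice cs (some ki.2) (some (j + 1))) else st2
            | none => st2
        | none => st2
      else st2) st) PySem.Set.empty

lemma pvA_eq (s : String) : count_special_substrings s = ((pvSetA s.toList).length : Int) := rfl

lemma pvB_eq (s : String) : count_special_substrings_alt s = ((pvSetB s.toList).length : Int) := rfl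

lemma pv_mem_foldl {A B : Type} (x : A) (step : List A -> B -> List A) (C : B -> Prop)
    (h : forall st a, x ∈ step st a ↔ x ∈ st ∨ C a) :
    forall (l : List B) (init : List A), x ∈ l.foldl step init ↔ x ∈ init ∨ ∃ a ∈ l, C a := by
  intro l
  induction l with
  | nil => simp
  | cons a l ih =>
      intro init
      rw [List.foldl_cons, ih, h]
      simp only [List.mem_cons]
      constructor
      · rintro ((hx | hc) | ⟨b, hb, hcb⟩)
        · exact Or.inl hx
        · exact Or.inr ⟨a, Or.inl rfl, hc⟩
        · exact Or.inr ⟨b, Or.inr hb, hcb⟩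
      · rintro (hx | ⟨b, (rfl | hb), hcb⟩)
        · exact Or.inl (Or.inl hx)
        · exact Or.inl (Or.inr hcb)
        · exact Or.inr ⟨b, hb, hcb⟩

lemma pv_nodup_foldl {A B : Type} (step : List A -> B -> List A)
    (h : forall st a, st.Nodup -> (step st a).Nodup) :
    forall (l : List B) (init : List A), init.Nodup -> (l.foldl step init).Nodup := by
  intro l
  induction l with
  | nil => intro init hi; simpa using hi
  | cons a l ih => intro init hi; rw [List.foldl_cons]; exact ih _ (h _ _ hi)

lemma pv_slice_facts (cs : List Char) (a b : Nat) (hab : a + 3 ≤ b) (hb : b < cs.length) :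
    PySem.List.pyGet? ((cs.drop a).take (b + 1 - a)) 0 = cs[a]? ∧
      PySem.List.pyGet? ((cs.drop a).take (b + 1 - a)) (-1) = cs[b]? := by
  have hlen : ((cs.drop a).take (b + 1 - a)).length = b + 1 - a := by
    simp [List.length_take, List.length_drop]; omega
  constructor
  · rw [PySem.List.pyGet?_zero, List.getElem?_take_of_lt (by omega), List.getElem?_drop]
    norm_num
  · rw [PySem.List.pyGet?_neg_one, List.getLast?_eq_getElem?, hlen,
      List.getElem?_take_of_lt (by omega), List.getElem?_drop]
    have : a + (b + 1 - a - 1) = b := by omega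
    rw [this]

lemma pv_mem_setA_raw (cs : List Char) (x : List Char) :
    x ∈ pvSetA cs ↔
    ∃ start ∈ PySem.List.pyRange 0 (cs.length : Int) 1,
      ∃ e ∈ PySem.List.pyRange (start + 4) ((cs.length : Int) + 1) 1,
        ∃ c0 cl : Char,
          PySem.List.pyGet? (PySem.List.slice cs (some start) (some e)) 0 = some c0 ∧
          PySem.List.pyGet? (PySem.List.slice cs (some start) (some e)) (-1) = some cl ∧
          (c0 == cl && PySem.Str.isupper c0) = true ∧
          x = PySem.List.slice cs (some start) (some e) := by
  unfold pvSetA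
  rw [pv_mem_foldl x _
    (fun start => ∃ e ∈ PySem.List.pyRange (start + 4) ((cs.length : Int) + 1) 1,
        ∃ c0 cl : Char,
          PySem.List.pyGet? (PySem.List.slice cs (some start) (some e)) 0 = some c0 ∧
          PySem.List.pyGet? (PySem.List.slice cs (some start) (some e)) (-1) = some cl ∧
          (c0 == cl && PySem.Str.isupper c0) = true ∧
          x = PySem.List.slice cs (some start) (some e)) ?_]
  · simp only [PySem.Set.empty, List.not_mem_nil, false_or]
  · intro st start
    rw [pv_mem_foldl x _
      (fun e => ∃ c0 cl : Char,
          PySem.List.pyGet? (PySem.List.slice cs (some start) (some e)) 0 = some c0 ∧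
          PySem.List.pyGet? (PySem.List.slice cs (some start) (some e)) (-1) = some cl ∧
          (c0 == cl && PySem.Str.isupper c0) = true ∧
          x = PySem.List.slice cs (some start) (some e)) ?_]
    intro st2 e
    dsimp only
    cases h0 : PySem.List.pyGet? (PySem.List.slice cs (some start) (some e)) 0 with
    | none => simp [h0]
    | some c0 =>
      cases h1 : PySem.List.pyGet? (PySem.List.slice cs (some start) (some e)) (-1) with
      | none => simp [h0, h1]
      | some cl =>
        dsimp only
        split_ifs with hc
        · simp only [Bool.and_eq_true, beq_iff_eq] at hc
          obtain ⟨rfl, hup⟩ := hc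
          simp [PySem.Set.mem_add, h0, h1, hup]
        · simp only [Bool.and_eq_true, beq_iff_eq, not_and] at hc
          simp only [h0, h1, Option.some.injEq]
          constructor
          · exact fun hx => Or.inl hx
          · rintro (hx | ⟨c0', cl', ⟨rfl, rfl, hcc, -⟩⟩)
            · exact hx
            · exact absurd hcc (by simpa using hc)

lemma pv_mem_setA (cs : List Char) (x : List Char) : x ∈ pvSetA cs ↔ pvQ cs x := by
  rw [pv_mem_setA_raw]
  constructor
  · rintro ⟨start, hs, e, he, c0, cl, hg0, hg1, hcond, hx⟩
    rw [PySem.List.mem_pyRange_one] at hs he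
    lift start to ℕ using hs.1 with a
    lift e to ℕ using (by omega) with b1
    have ha : a < cs.length := by exact_mod_cast hs.2
    have hab1 : a + 4 ≤ b1 := by exact_mod_cast he.1
    have hb1 : b1 < cs.length + 1 := by exact_mod_cast he.2
    rw [PySem.List.slice_natCast] at hg0 hg1 hx
    have hb1e : b1 = (b1 - 1) + 1 := by omega
    rw [hb1e] at hg0 hg1 hx
    obtain ⟨hA, hB⟩ := pv_slice_facts cs a (b1 - 1) (by omega) (by omega)
    rw [hA] at hg0
    rw [hB] at hg1
    simp only [Bool.and_eq_true, beq_iff_eq] at hcond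
    obtain ⟨rfl, hup⟩ := hcond
    exact ⟨a, b1 - 1, by omega, by omega, ⟨c0, hg0, hg1, hup⟩, hx⟩
  · rintro ⟨a, b, hab, hb, ⟨c, hca, hcb, hup⟩, rfl⟩
    refine ⟨(a : Int), ?_, ((b + 1 : Nat) : Int), ?_, c, c, ?_, ?_, by simp [hup], ?_⟩
    · rw [PySem.List.mem_pyRange_one]; constructor <;> [positivity; exact_mod_cast (by omega : a < cs.length)]
    · rw [PySem.List.mem_pyRange_one]; constructor
      · exact_mod_cast (by omega : a + 4 ≤ b + 1)
      · exact_mod_cast (by omega : b + 1 < cs.length + 1)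
    · rw [PySem.List.slice_natCast, (pv_slice_facts cs a b hab hb).1]; exact hca
    · rw [PySem.List.slice_natCast, (pv_slice_facts cs a b hab hb).2]; exact hcb
    · rw [PySem.List.slice_natCast]

lemma pv_mem_ups (cs : List Char) (i : Int) :
    i ∈ pvUps cs ↔ ∃ a : Nat, ∃ c : Char, cs[a]? = some c ∧ PySem.Str.isupper c = true ∧ i = (a : Int) := by
  unfold pvUps
  simp only [List.mem_map, List.mem_filter, PySem.List.mem_enumerate_iff]
  constructor
  · rintro ⟨p, ⟨⟨k, hk, rfl⟩, hup⟩, rfl⟩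
    exact ⟨k, cs[k], by simp [hk], hup, by simp⟩
  · rintro ⟨a, c, hc, hup, rfl⟩
    have ha : a < cs.length := (List.getElem?_eq_some_iff.mp hc).1
    refine ⟨((a : Int), cs[a]), ⟨⟨a, ha, by simp⟩, ?_⟩, rfl⟩
    have : cs[a] = c := ((List.getElem?_eq_some_iff.mp hc).2)
    simp [this, hup]

lemma pv_ups_pairwise (cs : List Char) : (pvUps cs).Pairwise (· < ·) := by
  exact List.pairwise_map.mpr ((PySem.List.pairwise_lt_enumerate cs 0).filter _)

lemma pv_mem_setB_raw (cs : List Char) (x : List Char) :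
    x ∈ pvSetB cs ↔
    ∃ ki ∈ PySem.List.enumerate (pvUps cs) 0,
      ∃ j ∈ PySem.List.slice (pvUps cs) (some ki.1) none,
        (j - ki.2 ≥ 3) ∧ ∃ ca cb : Char,
          PySem.List.pyGet? cs ki.2 = some ca ∧ PySem.List.pyGet? cs j = some cb ∧
          (ca == cb) = true ∧ x = PySem.List.slice cs (some ki.2) (some (j + 1)) := by
  unfold pvSetB
  rw [pv_mem_foldl x _
    (fun ki => ∃ j ∈ PySem.List.slice (pvUps cs) (some ki.1) none,
        (j - ki.2 ≥ 3) ∧ ∃ ca cb : Char,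
          PySem.List.pyGet? cs ki.2 = some ca ∧ PySem.List.pyGet? cs j = some cb ∧
          (ca == cb) = true ∧ x = PySem.List.slice cs (some ki.2) (some (j + 1))) ?_]
  · simp only [PySem.Set.empty, List.not_mem_nil, false_or]
  · intro st ki
    rw [pv_mem_foldl x _
      (fun j => (j - ki.2 ≥ 3) ∧ ∃ ca cb : Char,
          PySem.List.pyGet? cs ki.2 = some ca ∧ PySem.List.pyGet? cs j = some cb ∧
          (ca == cb) = true ∧ x = PySem.List.slice cs (some ki.2) (some (j + 1))) ?_]
    intro st2 j
    dsimp only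
    split_ifs with hge
    · cases h0 : PySem.List.pyGet? cs ki.2 with
      | none => simp [h0, hge]
      | some ca =>
        cases h1 : PySem.List.pyGet? cs j with
        | none => simp [h0, h1, hge]
        | some cb =>
          dsimp only
          split_ifs with hc
          · have hcc : ca = cb := by simpa using hc
            subst hcc
            simp [PySem.Set.mem_add, h0, h1, hge]
          · simp only [h0, h1, Option.some.injEq]
            constructor
            · exact fun hx => Or.inl hx
            · rintro (hx | ⟨-, ca', cb', ⟨rfl, rfl, hcc, -⟩⟩)
              · exact hx
              · exact absurd hcc (by simpa using hc)
    · simp [hge]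

lemma pv_mem_setB (cs : List Char) (x : List Char) : x ∈ pvSetB cs ↔ pvQ cs x := by
  rw [pv_mem_setB_raw]
  constructor
  · rintro ⟨ki, hki, j, hj, hge, ca, cb, hga, hgb, hcc, hx⟩
    rw [PySem.List.mem_enumerate_iff] at hki
    obtain ⟨k, hk, rfl⟩ := hki
    simp only [zero_add] at hj hge hga hx
    have hi : (pvUps cs)[k] ∈ pvUps cs := List.getElem_mem hk
    rw [pv_mem_ups] at hi
    obtain ⟨a, c, hca, hup, hia⟩ := hi
    rw [PySem.List.slice_from_natCast] at hj
    have hjm : j ∈ pvUps cs := List.mem_of_mem_drop hj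
    rw [pv_mem_ups] at hjm
    obtain ⟨b, c', hcb, hup', rfl⟩ := hjm
    rw [hia] at hga hge hx
    rw [PySem.List.pyGet?_natCast] at hga hgb
    have hcac : ca = c := by rw [hca] at hga; exact (Option.some.injEq _ _ ▸ hga).symm
    have hcbc : cb = c' := by rw [hcb] at hgb; exact (Option.some.injEq _ _ ▸ hgb).symm
    have hab : a + 3 ≤ b := by
      have : (a : Int) + 3 ≤ (b : Int) := by omega
      exact_mod_cast this
    have hbl : b < cs.length := (List.getElem?_eq_some_iff.mp hcb).1
    have hcacb : ca = cb := by simpa using hcc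
    refine ⟨a, b, hab, hbl, ⟨ca, by rw [hga], ?_, by rw [hcac]; exact hup⟩, ?_⟩
    · rw [hgb, hcacb]
    · rw [hx]
      have : ((b : Int) + 1) = ((b + 1 : Nat) : Int) := by push_cast; ring
      rw [this, PySem.List.slice_natCast]
  · rintro ⟨a, b, hab, hb, ⟨c, hca, hcb, hup⟩, rfl⟩
    have hma : (a : Int) ∈ pvUps cs := (pv_mem_ups _ _).mpr ⟨a, c, hca, hup, rfl⟩
    have hmb : (b : Int) ∈ pvUps cs := (pv_mem_ups _ _).mpr ⟨b, c, hcb, hup, rfl⟩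
    obtain ⟨k, hk, hak⟩ := List.mem_iff_getElem.mp hma
    obtain ⟨m, hm, hbm⟩ := List.mem_iff_getElem.mp hmb
    have hkm : k ≤ m := by
      by_contra hlt
      have hlt' : m < k := Nat.lt_of_not_le hlt
      have hp := List.pairwise_iff_getElem.mp (pv_ups_pairwise cs) m k hm hk hlt'
      rw [hak, hbm] at hp
      have : b < a := by exact_mod_cast hp
      omega
    refine ⟨((0 : Int) + (k : Int), (pvUps cs)[k]), (by rw [PySem.List.mem_enumerate_iff]; exact ⟨k, hk, rfl⟩),
      (b : Int), ?_, ?_, c, c, ?_, ?_, by simp, ?_⟩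
    · simp only [zero_add]
      rw [PySem.List.slice_from_natCast]
      have hlen : m - k < ((pvUps cs).drop k).length := by simp [List.length_drop]; omega
      have hd : ((pvUps cs).drop k)[m - k]'hlen = (b : Int) := by
        rw [List.getElem_drop]
        have : k + (m - k) = m := by omega
        simp only [this]
        exact hbm
      exact hd ▸ List.getElem_mem hlen
    · rw [hak]
      have : (a : Int) + 3 ≤ (b : Int) := by exact_mod_cast hab
      omega
    · rw [hak, PySem.List.pyGet?_natCast]; exact hca
    · rw [PySem.List.pyGet?_natCast]; exact hcb
    · rw [hak]
      have : ((b : Int) + 1) = ((b + 1 : Nat) : Int) := by push_cast; ring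
      rw [this, PySem.List.slice_natCast]


lemma pv_nodup_setA (cs : List Char) : (pvSetA cs).Nodup := by
  unfold pvSetA
  refine pv_nodup_foldl _ ?_ _ _ List.nodup_nil
  intro st start hst
  refine pv_nodup_foldl _ ?_ _ _ hst
  intro st2 e h2
  dsimp only
  cases PySem.List.pyGet? (PySem.List.slice cs (some start) (some e)) 0 with
  | none => exact h2
  | some c0 =>
    cases PySem.List.pyGet? (PySem.List.slice cs (some start) (some e)) (-1) with
    | none => exact h2
    | some cl =>
      dsimp only
      split_ifs
      · exact PySem.Set.nodup_add _ _ h2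
      · exact h2

lemma pv_nodup_setB (cs : List Char) : (pvSetB cs).Nodup := by
  unfold pvSetB
  refine pv_nodup_foldl _ ?_ _ _ List.nodup_nil
  intro st ki hst
  refine pv_nodup_foldl _ ?_ _ _ hst
  intro st2 j h2
  dsimp only
  split_ifs
  · cases PySem.List.pyGet? cs ki.2 with
    | none => exact h2
    | some a =>
      cases PySem.List.pyGet? cs j with
      | none => exact h2
      | some b =>
        dsimp only
        split_ifs
        · exact PySem.Set.nodup_add _ _ h2
        · exact h2
  · exact h2

-- ===== VERDICT (by name: the statement is the Claim_ definition above) =====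
theorem count_special_substrings_spec : Claim_equal_count_special_substrings := by
  intro s _
  unfold Spec_count_special_substrings
  rw [pvA_eq, pvB_eq]
  congr 1
  exact ((List.perm_ext_iff_of_nodup (pv_nodup_setA _) (pv_nodup_setB _)).mpr
    (fun x => (pv_mem_setA _ x).trans (pv_mem_setB _ x).symm)).length_eq
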